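-- pv_equiv track=rewrite | github.com/JorG96/PythonGraphs | IsMobiusLadder.py | solution
-- ===== SOURCE A (Python) =====
-- from collections import deque
--
-- def bfs(graph, source, target):
--     """ Returns distance from source to target.
--     """
--     dist = {source: 0}
--     queue = deque([source])
--     while queue:
--         u = queue.popleft()
--         for v in graph[u]:
--             if v not in dist:
--                 dist[v] = dist[u] + 1
--                 if v == target:
--                     return dist[v]
--                 if dist[v] > 2:
--                     return -1
--                 queue.append(v)
--
-- def are_dist_ok(graph, n):
--     """ Checks that distance among all the neighbors of every vertex is 2.
--     """
--     for i in range(n):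
--         if len([True for j in graph[i] if i != j]) != 3 or \
--                 [bfs(graph, graph[i][x], graph[i][y])
--                  for x in range(2) for y in range(x + 1, 3)] != [2, 2, 2]:
--             return False
--     return True
--
-- def solution(n, ladder):
--     """ Returns True if graph is Mobius ladder, False otherwise.
--     """
--     graph = [[] for _ in range(n)]  # adjacency list
--     for u, v in ladder:
--         graph[u].append(v)
--         graph[v].append(u)
--
--     if n == 4:  # check if it's a complete graph
--         return all([len([True for j in graph[i] if j != i]) == 3 for i in range(n)])
--     return are_dist_ok(graph, n)
-- ===== SOURCE B (Python) =====
-- def solution(n, ladder):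
--     """ Returns True if graph is Mobius ladder, False otherwise. """
--     graph = [[] for _ in range(n)]  # adjacency list
--     for u, v in ladder:
--         graph[u].append(v)
--         graph[v].append(u)
--
--     if n == 4:  # check if it's a complete graph
--         return all([len([True for j in graph[i] if j != i]) == 3 for i in range(n)])
--
--     N = [set(adj) for adj in graph]  # adjacency sets
--
--     def dist2(a, b):
--         # distance from a to b is exactly 2: not equal, not adjacent, common neighbour
--         return a != b and b not in N[a] and any(w != a and b in N[w] for w in N[a])
--
--     for i in range(n):
--         if len([True for j in graph[i] if i != j]) != 3:
--             return False
--         a, b, c = graph[i][0], graph[i][1], graph[i][2]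
--         if not (dist2(a, b) and dist2(a, c) and dist2(b, c)):
--             return False
--     return True
-- ===== Notes on version B (the rewrite author's own statement) =====
-- stated objective: alternative
-- what changed: The per-vertex BFS with a dict/deque that tested distance==2 between neighbours is replaced by precomputed adjacency sets and a direct distance-2 predicate (not equal, not adjacent, common neighbour exists); graph building, the n==4 complete-graph case and the degree test are kept.
import Mathlib
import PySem

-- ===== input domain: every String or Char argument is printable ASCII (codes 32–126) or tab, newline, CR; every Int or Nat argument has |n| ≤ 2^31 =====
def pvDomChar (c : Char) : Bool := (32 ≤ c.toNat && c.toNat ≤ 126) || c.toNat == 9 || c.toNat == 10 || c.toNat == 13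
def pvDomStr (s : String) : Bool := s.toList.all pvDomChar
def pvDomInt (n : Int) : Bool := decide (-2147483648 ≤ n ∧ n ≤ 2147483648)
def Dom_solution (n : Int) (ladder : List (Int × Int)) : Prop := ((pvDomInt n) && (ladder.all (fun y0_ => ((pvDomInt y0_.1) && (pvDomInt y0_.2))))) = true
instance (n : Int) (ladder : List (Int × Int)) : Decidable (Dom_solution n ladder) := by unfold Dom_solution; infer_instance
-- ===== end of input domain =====

-- B replaces the per-vertex BFS distance test by adjacency sets and a direct
-- "distance exactly 2" predicate (alternative algorithm, not claimed faster).

-- ===== PORT A =====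

-- graph[u] (negative u wraps); total via getD [] — Python raises IndexError there, excluded by Pre_solution
def adjL (g : List (List Int)) (u : Int) : List Int := (PySem.List.pyGet? g u).getD []

-- shared graph construction (identical code in both Pythons):
-- graph = [[] for _ in range(n)]; for u, v in ladder: graph[u].append(v); graph[v].append(u)
def buildGraph (n : Int) (ladder : List (Int × Int)) : List (List Int) :=
  ladder.foldl (fun g p =>
      let g1 := PySem.List.pySetD g p.1 (adjL g p.1 ++ [p.2])
      PySem.List.pySetD g1 p.2 (adjL g1 p.2 ++ [p.1]))
    (List.replicate n.toNat ([] : List Int))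

-- the body of bfs's inner 'for v in graph[u]' loop, with its three early returns
def bfsInner (target du : Int) (dist : PySem.Dict Int Int) (queue : List Int) :
    List Int → (PySem.Dict Int Int × List Int) ⊕ (Option Int)
  | [] => Sum.inl (dist, queue)
  | v :: vs =>
    match dist.get? v with
    | some _ => bfsInner target du dist queue vs
    | none =>
      let dist' := dist.insert v (du + 1)
      if v == target then Sum.inr (some (du + 1))
      else if du + 1 > 2 then Sum.inr (some (-1))
      else bfsInner target du dist' (queue ++ [v]) vs

-- the 'while queue' loop; fuel is only a totality guard (Python's loop always terminates)
def bfsLoop (g : List (List Int)) (target : Int) : Nat → PySem.Dict Int Int → List Int → Option Int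
  | 0, _, _ => none
  | fuel + 1, dist, queue =>
    match queue with
    | [] => none
    | u :: rest =>
      match bfsInner target ((dist.get? u).getD 0) dist rest (adjL g u) with
      | Sum.inr r => r
      | Sum.inl (d', q') => bfsLoop g target fuel d' q'

def bfs (g : List (List Int)) (source target : Int) : Option Int :=
  bfsLoop g target
    (1 + (adjL g source).length + ((adjL g source).map (fun w => (adjL g w).length)).sum)
    (PySem.Dict.empty.insert source 0) [source]

def areDistOk (g : List (List Int)) (n : Int) : Bool :=
  (PySem.List.pyRange 0 n 1).all (fun i =>
    let gi := adjL g i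
    !(decide (((gi.filter (fun j => i != j)).length : Int) ≠ 3) ||
      decide ([bfs g (PySem.List.pyGetD gi 0 0) (PySem.List.pyGetD gi 1 0),
               bfs g (PySem.List.pyGetD gi 0 0) (PySem.List.pyGetD gi 2 0),
               bfs g (PySem.List.pyGetD gi 1 0) (PySem.List.pyGetD gi 2 0)] ≠
              [some 2, some 2, some 2])))

def solution (n : Int) (ladder : List (Int × Int)) : Bool :=
  let g := buildGraph n ladder
  if n == 4 then
    (PySem.List.pyRange 0 n 1).all (fun i => ((adjL g i).filter (fun j => j != i)).length == 3)
  else areDistOk g n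

-- ===== PORT B =====

-- N[a] (negative a wraps); total via getD ∅ — IndexError excluded by Pre_solution
def setAdjL (N : List (PySem.Set Int)) (a : Int) : PySem.Set Int :=
  (PySem.List.pyGet? N a).getD PySem.Set.empty

-- dist2(a,b): a != b and b not in N[a] and any(w != a and b in N[w] for w in N[a])
def dist2 (N : List (PySem.Set Int)) (a b : Int) : Bool :=
  a != b && !(PySem.Set.contains (setAdjL N a) b) &&
    (setAdjL N a).any (fun w => w != a && PySem.Set.contains (setAdjL N w) b)

def solution_alt (n : Int) (ladder : List (Int × Int)) : Bool :=
  let g := buildGraph n ladder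
  if n == 4 then
    (PySem.List.pyRange 0 n 1).all (fun i => ((adjL g i).filter (fun j => j != i)).length == 3)
  else
    let N := g.map PySem.Set.ofList
    (PySem.List.pyRange 0 n 1).all (fun i =>
      let gi := adjL g i
      if ((gi.filter (fun j => i != j)).length : Int) ≠ 3 then false
      else
        dist2 N (PySem.List.pyGetD gi 0 0) (PySem.List.pyGetD gi 1 0) &&
        dist2 N (PySem.List.pyGetD gi 0 0) (PySem.List.pyGetD gi 2 0) &&
        dist2 N (PySem.List.pyGetD gi 1 0) (PySem.List.pyGetD gi 2 0))

-- ===== PRECONDITION & SPEC =====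
-- Pre_ excludes exactly the inputs where Python A raises IndexError: a ladder endpoint
-- outside the valid (possibly negative) index range of the n-element adjacency list.
def Pre_solution (n : Int) (ladder : List (Int × Int)) : Prop :=
  ∀ p ∈ ladder, -n ≤ p.1 ∧ p.1 < n ∧ -n ≤ p.2 ∧ p.2 < n
instance (n : Int) (ladder : List (Int × Int)) : Decidable (Pre_solution n ladder) := by
  unfold Pre_solution; infer_instance

def pvWitness_solution : Int × (List (Int × Int)) :=
  (4, [(0, 1), (1, 2), (2, 3), (3, 0), (0, 2), (1, 3)])

def Spec_solution (n : Int) (ladder : List (Int × Int)) (out : Bool) : Prop := out = solution_alt n ladder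
instance (n : Int) (ladder : List (Int × Int)) (out : Bool) : Decidable (Spec_solution n ladder out) := by unfold Spec_solution; infer_instance

-- ===== CLAIM (what is proved, stated in full; the proofs are below) =====
def Claim_equal_solution : Prop := ∀ (n : Int) (ladder : List (Int × Int)), Dom_solution n ladder → Pre_solution n ladder → Spec_solution n ladder (solution n ladder)

-- ===== LEMMAS AND PROOFS =====

lemma innerLow (t du : Int) (hdu : du + 1 ≤ 2) (vs : List Int) :
    ∀ (dist : PySem.Dict Int Int) (queue : List Int),
      if dist.get? t = none ∧ t ∈ vs then
        bfsInner t du dist queue vs = Sum.inr (some (du + 1))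
      else
        ∃ dist' ex, bfsInner t du dist queue vs = Sum.inl (dist', queue ++ ex) ∧
          ex.Sublist vs ∧
          (∀ x, dist'.get? x =
            if x ∈ vs ∧ dist.get? x = none then some (du + 1) else dist.get? x) ∧
          (∀ x, x ∈ ex ↔ x ∈ vs ∧ dist.get? x = none) := by
  induction vs with
  | nil =>
    intro dist queue
    rw [if_neg (by simp)]
    exact ⟨dist, [], by simp [bfsInner], List.Sublist.refl _, by simp, by simp⟩
  | cons v vs ih =>
    intro dist queue
    cases hv : dist.get? v with
    | some d =>
      have hstep : bfsInner t du dist queue (v :: vs) = bfsInner t du dist queue vs := by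
        simp [bfsInner, hv]
      have H := ih dist queue
      by_cases hc : dist.get? t = none ∧ t ∈ vs
      · rw [if_pos ⟨hc.1, List.mem_cons_of_mem _ hc.2⟩, hstep]
        rw [if_pos hc] at H; exact H
      · rw [if_neg (by
          rintro ⟨h1, h2⟩
          rcases List.mem_cons.mp h2 with h2 | h2
          · rw [h2] at h1; rw [h1] at hv; cases hv
          · exact hc ⟨h1, h2⟩)]
        rw [if_neg hc] at H
        obtain ⟨dist', ex, heq, hsub, hchar, hmem⟩ := H
        refine ⟨dist', ex, by rw [hstep]; exact heq, hsub.cons _, ?_, ?_⟩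
        · intro x
          rw [hchar x]
          by_cases hx : x = v
          · subst hx; simp [hv]
          · simp [List.mem_cons, hx]
        · intro x
          rw [hmem x]
          constructor
          · rintro ⟨h1, h2⟩; exact ⟨List.mem_cons_of_mem _ h1, h2⟩
          · rintro ⟨h1, h2⟩
            rcases List.mem_cons.mp h1 with h | h
            · rw [h] at h2; rw [h2] at hv; cases hv
            · exact ⟨h, h2⟩
    | none =>
      by_cases hvt : v = t
      · subst hvt
        rw [if_pos ⟨hv, List.mem_cons_self⟩]
        simp [bfsInner, hv]
      · have hne : ¬ ((v == t) = true) := by simp [hvt]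
        have hgt : ¬ (du + 1 > 2) := by omega
        have hstep : bfsInner t du dist queue (v :: vs) =
            bfsInner t du (dist.insert v (du + 1)) (queue ++ [v]) vs := by
          simp [bfsInner, hv, hne, hgt]
        have hins : (dist.insert v (du + 1)).get? t = dist.get? t :=
          PySem.Dict.get?_insert_of_ne _ _ (fun h => hvt h.symm)
        have H := ih (dist.insert v (du + 1)) (queue ++ [v])
        by_cases hc : dist.get? t = none ∧ t ∈ vs
        · rw [if_pos ⟨hc.1, List.mem_cons_of_mem _ hc.2⟩, hstep]
          rw [if_pos (by rw [hins]; exact hc)] at H; exact H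
        · rw [if_neg (by
            rintro ⟨h1, h2⟩
            rcases List.mem_cons.mp h2 with h2 | h2
            · exact hvt h2.symm
            · exact hc ⟨h1, h2⟩)]
          rw [if_neg (by rw [hins]; exact hc)] at H
          obtain ⟨dist', ex, heq, hsub, hchar, hmem⟩ := H
          refine ⟨dist', v :: ex, ?_, hsub.cons₂ _, ?_, ?_⟩
          · rw [hstep, heq, List.append_assoc]; rfl
          · intro x
            rw [hchar x]
            by_cases hx : x = v
            · subst hx
              rw [if_neg (by simp [PySem.Dict.get?_insert_self]),
                  PySem.Dict.get?_insert_self, if_pos ⟨List.mem_cons_self, hv⟩]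
            · rw [PySem.Dict.get?_insert_of_ne _ _ hx]
              simp [List.mem_cons, hx]
          · intro x
            by_cases hx : x = v
            · subst hx; simp [hv]
            · simp only [List.mem_cons, hmem x, PySem.Dict.get?_insert_of_ne _ _ hx]
              simp [hx]

lemma innerHigh (t du : Int) (hdu : 2 < du + 1) (vs : List Int) :
    ∀ (dist : PySem.Dict Int Int) (queue : List Int),
      (∃ r, bfsInner t du dist queue vs = Sum.inr r ∧ r ≠ some 2) ∨
        bfsInner t du dist queue vs = Sum.inl (dist, queue) := by
  induction vs with
  | nil => intro dist queue; right; simp [bfsInner]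
  | cons v vs ih =>
    intro dist queue
    cases hv : dist.get? v with
    | some d =>
      have hstep : bfsInner t du dist queue (v :: vs) = bfsInner t du dist queue vs := by
        simp [bfsInner, hv]
      rw [hstep]; exact ih dist queue
    | none =>
      by_cases hvt : v = t
      · subst hvt
        left
        refine ⟨some (du + 1), by simp [bfsInner, hv], ?_⟩
        intro h
        have : du + 1 = 2 := by exact_mod_cast Option.some.inj h
        omega
      · left
        refine ⟨some (-1), ?_, by decide⟩
        have hne : ¬ ((v == t) = true) := by simp [hvt]
        simp [bfsInner, hv, hne, hdu]

lemma loopSpec (g : List (List Int)) (t : Int) :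
    ∀ (fuel : Nat) (q1 q2 : List Int) (dist : PySem.Dict Int Int),
      (∀ u ∈ q1, dist.get? u = some 1) →
      (∀ u ∈ q2, dist.get? u = some 2) →
      q1.length + q2.length + ((q1.map fun w => (adjL g w).length).sum) ≤ fuel →
      (bfsLoop g t fuel dist (q1 ++ q2) = some 2 ↔
        (dist.get? t = none ∧ ∃ w ∈ q1, t ∈ adjL g w)) := by
  intro fuel
  induction fuel with
  | zero =>
    intro q1 q2 dist h1 h2 hf
    have : q1 = [] := by
      cases q1 with
      | nil => rfl
      | cons a l => simp at hf
    subst this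
    simp [bfsLoop]
  | succ fuel ih =>
    intro q1 q2 dist h1 h2 hf
    cases q1 with
    | nil =>
      cases q2 with
      | nil => simp [bfsLoop]
      | cons w q2' =>
        have hw : dist.get? w = some 2 := h2 w List.mem_cons_self
        have hdu : ((dist.get? w).getD 0) = 2 := by rw [hw]; rfl
        rcases innerHigh t ((dist.get? w).getD 0) (by rw [hdu]; omega) (adjL g w) dist q2' with
          ⟨r, hr, hr2⟩ | hunch
        · have : bfsLoop g t (fuel + 1) dist ([] ++ w :: q2') = r := by
            simp only [List.nil_append, bfsLoop, hr]
          rw [this]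
          simp only [List.not_mem_nil, false_and, exists_const, and_false, iff_false]
          exact fun h => hr2 h
        · have hstep : bfsLoop g t (fuel + 1) dist ([] ++ w :: q2') =
              bfsLoop g t fuel dist ([] ++ q2') := by
            simp only [List.nil_append, bfsLoop, hunch]
          rw [hstep, ih [] q2' dist (by simp) (fun u hu => h2 u (List.mem_cons_of_mem _ hu))
            (by simp at hf ⊢; omega)]
    | cons w q1' =>
      have hw : dist.get? w = some 1 := h1 w List.mem_cons_self
      have hdu : ((dist.get? w).getD 0) = 1 := by rw [hw]; rfl
      have H := innerLow t ((dist.get? w).getD 0) (by rw [hdu]; omega) (adjL g w) dist (q1' ++ q2)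
      by_cases hc : dist.get? t = none ∧ t ∈ adjL g w
      · rw [if_pos hc] at H
        have : bfsLoop g t (fuel + 1) dist ((w :: q1') ++ q2) = some ((dist.get? w).getD 0 + 1) := by
          simp only [List.cons_append, bfsLoop, H]
        rw [this, hdu]
        constructor
        · intro _; exact ⟨hc.1, w, List.mem_cons_self, hc.2⟩
        · intro _; norm_num
      · rw [if_neg hc] at H
        obtain ⟨dist', ex, heq, hsub, hchar, hmem⟩ := H
        have hstep : bfsLoop g t (fuel + 1) dist ((w :: q1') ++ q2) =
            bfsLoop g t fuel dist' (q1' ++ (q2 ++ ex)) := by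
          simp only [List.cons_append, bfsLoop, heq, List.append_assoc]
        have h1' : ∀ u ∈ q1', dist'.get? u = some 1 := by
          intro u hu
          rw [hchar u, if_neg (by rintro ⟨_, h⟩; rw [h1 u (List.mem_cons_of_mem _ hu)] at h; cases h)]
          exact h1 u (List.mem_cons_of_mem _ hu)
        have h2' : ∀ u ∈ q2 ++ ex, dist'.get? u = some 2 := by
          intro u hu
          rcases List.mem_append.mp hu with hu | hu
          · rw [hchar u, if_neg (by rintro ⟨_, h⟩; rw [h2 u hu] at h; cases h)]
            exact h2 u hu
          · rw [hchar u, if_pos ((hmem u).mp hu), hdu]; norm_num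
        have hlen : ex.length ≤ (adjL g w).length := hsub.length_le
        have hf' : q1'.length + (q2 ++ ex).length +
            ((q1'.map fun w => (adjL g w).length).sum) ≤ fuel := by
          simp only [List.length_cons, List.length_append, List.map_cons, List.sum_cons] at hf ⊢
          omega
        rw [hstep, ih q1' (q2 ++ ex) dist' h1' h2' hf']
        have hdt : dist'.get? t = dist.get? t := by
          rw [hchar t, if_neg (by rintro ⟨h1t, h2t⟩; exact hc ⟨h2t, h1t⟩)]
        rw [hdt]
        constructor
        · rintro ⟨hn, w', hw', ht⟩; exact ⟨hn, w', List.mem_cons_of_mem _ hw', ht⟩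
        · rintro ⟨hn, w', hw', ht⟩
          rcases List.mem_cons.mp hw' with h | h
          · exact absurd ⟨hn, h ▸ ht⟩ hc
          · exact ⟨hn, w', h, ht⟩

theorem bfsChar (g : List (List Int)) (s t : Int) :
    bfs g s t = some 2 ↔
      (t ≠ s ∧ t ∉ adjL g s ∧ ∃ w ∈ adjL g s, w ≠ s ∧ t ∈ adjL g w) := by
  unfold bfs
  set dist0 : PySem.Dict Int Int := PySem.Dict.empty.insert s 0 with hdist0def
  set L := (adjL g s).length with hL
  set S := ((adjL g s).map (fun w => (adjL g w).length)).sum with hS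
  have hfuel : 1 + L + S = (L + S) + 1 := by omega
  rw [hfuel]
  have hdist0 : ∀ x : Int, (dist0).get? x =
      if x = s then some 0 else none := by
    intro x
    by_cases hx : x = s
    · subst hx; rw [hdist0def, PySem.Dict.get?_insert_self, if_pos rfl]
    · rw [hdist0def, PySem.Dict.get?_insert_of_ne _ _ hx, PySem.Dict.get?_empty, if_neg hx]
  have hdu : ((dist0).get? s).getD 0 = 0 := by
    rw [hdist0, if_pos rfl]; rfl
  have H := innerLow t (((dist0).get? s).getD 0)
    (by rw [hdu]; omega) (adjL g s) (dist0) []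
  by_cases hc : (dist0).get? t = none ∧ t ∈ adjL g s
  · rw [if_pos hc] at H
    have hts : t ≠ s := by
      intro h; have := hc.1; rw [hdist0, if_pos h] at this; cases this
    have : bfsLoop g t ((L + S) + 1) (dist0) [s] =
        some (((dist0).get? s).getD 0 + 1) := by
      simp only [bfsLoop, H]
    rw [this, hdu]
    constructor
    · intro h; exact absurd (by exact_mod_cast Option.some.inj h) (by norm_num)
    · rintro ⟨_, hns, _⟩; exact absurd hc.2 hns
  · rw [if_neg hc] at H
    obtain ⟨dist', ex, heq, hsub, hchar, hmem⟩ := H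
    have hstep : bfsLoop g t ((L + S) + 1) (dist0) [s] =
        bfsLoop g t (L + S) dist' ex := by
      simp only [bfsLoop, heq, List.nil_append]
    have h1 : ∀ u ∈ ex, dist'.get? u = some 1 := by
      intro u hu
      rw [hchar u, if_pos ((hmem u).mp hu), hdu]; norm_num
    have hfex : ex.length + ([] : List Int).length +
        ((ex.map fun w => (adjL g w).length).sum) ≤ L + S := by
      have h1l : ex.length ≤ L := hsub.length_le
      have h2l : ((ex.map fun w => (adjL g w).length).sum) ≤ S :=
        List.Sublist.sum_le_sum (hsub.map _) (by simp)
      simp only [List.length_nil]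
      omega
    have := loopSpec g t (L + S) ex [] dist' h1 (by simp) (by simpa using hfex)
    rw [(by simp : ex ++ ([] : List Int) = ex)] at this
    rw [hstep, this]
    have hdt : dist'.get? t = (dist0).get? t := by
      rw [hchar t, if_neg (by rintro ⟨h1t, h2t⟩; exact hc ⟨h2t, h1t⟩)]
    rw [hdt, hdist0]
    constructor
    · rintro ⟨hn, w, hw, ht⟩
      have hts : t ≠ s := by intro h; rw [if_pos h] at hn; cases hn
      obtain ⟨hwadj, hwnone⟩ := (hmem w).mp hw
      have hws : w ≠ s := by
        intro h; rw [hdist0, if_pos h] at hwnone; cases hwnone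
      have hnadj : t ∉ adjL g s := fun hmem' => hc ⟨by rw [hdist0, if_neg hts], hmem'⟩
      exact ⟨hts, hnadj, w, hwadj, hws, ht⟩
    · rintro ⟨hts, hnadj, w, hwadj, hws, ht⟩
      refine ⟨by rw [if_neg hts], w, ?_, ht⟩
      rw [hmem w, hdist0, if_neg hws]
      exact ⟨hwadj, rfl⟩

lemma setAdjL_map (g : List (List Int)) (a : Int) :
    setAdjL (g.map PySem.Set.ofList) a = PySem.Set.ofList (adjL g a) := by
  unfold setAdjL adjL
  have h : PySem.List.pyGet? (g.map PySem.Set.ofList) a =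
      (PySem.List.pyGet? g a).map PySem.Set.ofList := by
    simp [PySem.List.pyGet?, PySem.List.pyIdx?]
  rw [h]
  cases PySem.List.pyGet? g a <;> rfl

lemma dist2_iff (g : List (List Int)) (a b : Int) :
    dist2 (g.map PySem.Set.ofList) a b = true ↔
      (b ≠ a ∧ b ∉ adjL g a ∧ ∃ w ∈ adjL g a, w ≠ a ∧ b ∈ adjL g w) := by
  simp only [dist2, setAdjL_map, Bool.and_eq_true, Bool.not_eq_true', bne_iff_ne,
    List.any_eq_true, PySem.Set.contains_eq_listContains, List.contains_iff_mem]
  simp only [PySem.Set.mem_ofList, ← Bool.not_eq_true, List.contains_iff_mem]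
  tauto

lemma all_congr_mem (l : List Int) (f h : Int → Bool) (H : ∀ i ∈ l, f i = h i) :
    l.all f = l.all h := by
  induction l with
  | nil => rfl
  | cons x xs ih => simp only [List.all_cons, H x List.mem_cons_self,
      ih (fun i hi => H i (List.mem_cons_of_mem _ hi))]

theorem solution_eq_alt (n : Int) (ladder : List (Int × Int)) :
    solution n ladder = solution_alt n ladder := by
  unfold solution solution_alt
  by_cases h4 : (n == 4) = true
  · simp only [h4, if_true]
  · simp only [Bool.not_eq_true] at h4
    simp only [h4, Bool.false_eq_true, if_false]
    unfold areDistOk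
    apply all_congr_mem
    intro i _
    simp only []
    by_cases hdeg : (((adjL (buildGraph n ladder) i).filter (fun j => i != j)).length : Int) = 3
    · rw [if_neg (by omega), decide_eq_false (by omega : ¬ _), Bool.false_or]
      rw [Bool.eq_iff_iff]
      simp only [Bool.not_eq_true', decide_eq_false_iff_not, not_not, Bool.and_eq_true]
      simp only [List.cons.injEq, and_true]
      constructor
      · rintro ⟨h1, h2, h3⟩
        exact ⟨⟨(dist2_iff _ _ _).mpr ((bfsChar _ _ _).mp h1),
                (dist2_iff _ _ _).mpr ((bfsChar _ _ _).mp h2)⟩,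
               (dist2_iff _ _ _).mpr ((bfsChar _ _ _).mp h3)⟩
      · rintro ⟨⟨h1, h2⟩, h3⟩
        exact ⟨(bfsChar _ _ _).mpr ((dist2_iff _ _ _).mp h1),
               (bfsChar _ _ _).mpr ((dist2_iff _ _ _).mp h2),
               (bfsChar _ _ _).mpr ((dist2_iff _ _ _).mp h3)⟩
    · rw [if_pos hdeg, decide_eq_true hdeg, Bool.true_or]
      rfl

-- ===== VERDICT (by name: the statement is the Claim_ definition above) =====
theorem solution_spec : Claim_equal_solution :=
  fun n ladder _ _ => solution_eq_alt n ladder
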